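-- pv_equiv track=rewrite | github.com/johnlspouge/Euler | project_euler/project_euler_85.py | ascendingFactorialTwos
-- ===== SOURCE A (Python) =====
-- def ascendingFactorialTwos( bound ):
--     ascendingFactorialTwos = []
--     i = 0
--     aft = i * (i + 1)
--     while aft < bound:
--         ascendingFactorialTwos.append( aft )
--         i += 1
--         aft = i * (i + 1)
--     return ascendingFactorialTwos
-- ===== SOURCE B (Python) =====
-- def ascendingFactorialTwos(bound):
--     # Binary search for the number of terms n = least i >= 0 with i*(i+1) >= bound,
--     # then generate the list directly.
--     lo = 0
--     hi = bound if bound > 0 else 0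
--     while lo < hi:
--         mid = (lo + hi) // 2
--         if mid * (mid + 1) < bound:
--             lo = mid + 1
--         else:
--             hi = mid
--     return [i * (i + 1) for i in range(lo)]
-- ===== Notes on version B (the rewrite author's own statement) =====
-- stated objective: alternative
-- what changed: Replaces the linear while-loop test of every term by a binary search for the number of terms n (least i with i*(i+1) >= bound), then generates the n values directly with a comprehension; the search is O(log bound) but output generation still costs O(sqrt(bound)).
import Mathlib
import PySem

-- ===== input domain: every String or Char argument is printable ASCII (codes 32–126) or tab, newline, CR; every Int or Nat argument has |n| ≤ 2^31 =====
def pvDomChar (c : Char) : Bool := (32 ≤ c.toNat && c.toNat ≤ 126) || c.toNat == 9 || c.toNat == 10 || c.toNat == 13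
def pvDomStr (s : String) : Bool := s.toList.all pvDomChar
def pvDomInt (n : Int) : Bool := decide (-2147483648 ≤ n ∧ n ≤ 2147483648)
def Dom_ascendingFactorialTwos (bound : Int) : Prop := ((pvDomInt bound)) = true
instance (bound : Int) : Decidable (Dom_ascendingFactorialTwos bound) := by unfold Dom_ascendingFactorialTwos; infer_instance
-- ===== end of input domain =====

-- B replaces A's linear while-loop scan by a binary search for the term count,
-- followed by direct generation of the list (objective: alternative algorithm).


-- ===== PORT A =====
-- A's while loop: append i*(i+1) while it is < bound.
-- fuel is a totality guard only: bound.toNat + 1 steps always suffice (the loop runs while i < bound).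
def ascFTLoopA : Nat → Int → Int → List Int → List Int
  | 0, _, _, acc => acc
  | fuel + 1, bound, i, acc =>
    if i * (i + 1) < bound then ascFTLoopA fuel bound (i + 1) (acc ++ [i * (i + 1)]) else acc

def ascendingFactorialTwos (bound : Int) : List Int := ascFTLoopA (bound.toNat + 1) bound 0 []

-- ===== PORT B =====
-- B's binary search loop: shrink [lo, hi) to the least i with i*(i+1) ≥ bound.
-- fuel is a totality guard only: (hi - lo).toNat steps always suffice (the interval shrinks each step).
def ascFTSearch : Nat → Int → Int → Int → Int
  | 0, _, lo, _ => lo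
  | fuel + 1, bound, lo, hi =>
    if lo < hi then
      let mid := PySem.Int.floordiv (lo + hi) 2
      if mid * (mid + 1) < bound then ascFTSearch fuel bound (mid + 1) hi
      else ascFTSearch fuel bound lo mid
    else lo

def ascendingFactorialTwos_alt (bound : Int) : List Int :=
  let hi : Int := if bound > 0 then bound else 0
  let lo := ascFTSearch hi.toNat bound 0 hi
  (PySem.List.pyRange 0 lo 1).map (fun i => i * (i + 1))

-- ===== PRECONDITION & SPEC =====
def Spec_ascendingFactorialTwos (bound : Int) (out : List Int) : Prop := out = ascendingFactorialTwos_alt bound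
instance (bound : Int) (out : List Int) : Decidable (Spec_ascendingFactorialTwos bound out) := by unfold Spec_ascendingFactorialTwos; infer_instance

-- ===== CLAIM (what is proved, stated in full; the proofs are below) =====
def Claim_equal_ascendingFactorialTwos : Prop := ∀ (bound : Int), Dom_ascendingFactorialTwos bound → Spec_ascendingFactorialTwos bound (ascendingFactorialTwos bound)

-- ===== LEMMAS AND PROOFS =====

-- i*(i+1) is monotone on 0 ≤ j ≤ m
theorem ascFT_mono {j m : Int} (hj : 0 ≤ j) (hjm : j ≤ m) : j * (j + 1) ≤ m * (m + 1) := by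
  nlinarith [mul_nonneg (sub_nonneg.2 hjm) (by linarith : (0:Int) ≤ m + j + 1)]

-- binary-search correctness with sufficient fuel: the result r is in [0, hi],
-- all j < r pass the test, r itself fails it
theorem ascFTSearch_spec (bound : Int) : ∀ (fuel : Nat) (lo hi : Int), (hi - lo).toNat ≤ fuel →
    0 ≤ lo → lo ≤ hi →
    (∀ j, 0 ≤ j → j < lo → j * (j + 1) < bound) →
    ¬ (hi * (hi + 1) < bound) →
    0 ≤ ascFTSearch fuel bound lo hi ∧ ascFTSearch fuel bound lo hi ≤ hi ∧
    (∀ j, 0 ≤ j → j < ascFTSearch fuel bound lo hi → j * (j + 1) < bound) ∧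
    ¬ (ascFTSearch fuel bound lo hi * (ascFTSearch fuel bound lo hi + 1) < bound) := by
  intro fuel
  induction fuel with
  | zero =>
    intro lo hi hf h0 hlh hlow hhi
    have heq : lo = hi := by omega
    exact ⟨h0, hlh, hlow, by simp only [ascFTSearch]; exact heq ▸ hhi⟩
  | succ fuel ih =>
    intro lo hi hf h0 hlh hlow hhi
    by_cases hlt : lo < hi
    · have hb := PySem.Int.floordiv_two_mid_bounds (lo := lo) (hi := hi) (by omega)
      have hb3 : PySem.Int.floordiv (lo + hi) 2 < hi := by
        rw [PySem.Int.floordiv_eq_ediv_of_pos (by omega)]; omega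
      simp only [ascFTSearch, hlt, if_pos]
      generalize hg : PySem.Int.floordiv (lo + hi) 2 = m at hb hb3 ⊢
      obtain ⟨hb1, hb2⟩ := hb
      by_cases hm : m * (m + 1) < bound
      · simp only [hm, if_pos]
        exact ih (m + 1) hi (by omega) (by omega) (by omega)
          (fun j hj hjlt => by
            by_cases hjlo : j < lo
            · exact hlow j hj hjlo
            · have : j * (j + 1) ≤ m * (m + 1) := ascFT_mono hj (by omega)
              omega)
          hhi
      · simp only [hm, ite_false]
        have hr := ih lo m (by omega) h0 (by omega) hlow hm
        exact ⟨hr.1, by omega, hr.2.2⟩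
    · have heq : lo = hi := by omega
      simp only [ascFTSearch, hlt, ite_false]
      exact ⟨h0, hlh, hlow, heq ▸ hhi⟩

-- A's loop produces exactly the k remaining terms when i + k is the cutoff and fuel ≥ k
theorem ascFTLoopA_spec (bound : Int) : ∀ (k : Nat), ∀ (fuel : Nat) (i : Int) (acc : List Int),
    k ≤ fuel → 0 ≤ i →
    (∀ j, i ≤ j → j < i + (k : Int) → j * (j + 1) < bound) →
    ¬ ((i + (k : Int)) * (i + (k : Int) + 1) < bound) →
    ascFTLoopA fuel bound i acc =
      acc ++ (List.range k).map (fun (t : Nat) => (i + (t : Int)) * (i + (t : Int) + 1)) := by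
  intro k
  induction k with
  | zero =>
    intro fuel i acc _ _ _ hstop
    simp only [Nat.cast_zero, add_zero] at hstop
    cases fuel with
    | zero => simp [ascFTLoopA]
    | succ fuel => simp [ascFTLoopA, hstop]
  | succ k ihk =>
    intro fuel i acc hf hi hall hstop
    cases fuel with
    | zero => omega
    | succ fuel =>
      have hcond : i * (i + 1) < bound := hall i le_rfl (by push_cast; omega)
      simp only [ascFTLoopA, hcond, if_pos]
      rw [ihk fuel (i + 1) (acc ++ [i * (i + 1)]) (by omega) (by omega)
        (fun j hj hjlt => hall j (by omega) (by push_cast at hjlt ⊢; omega))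
        (by push_cast at hstop ⊢; (convert hstop using 2; ring))]
      rw [List.range_succ_eq_map, List.map_cons, List.map_map]
      simp only [List.append_assoc, List.singleton_append]
      congr 1
      congr 1
      · norm_num
      · apply List.map_congr_left
        intro t _
        simp only [Function.comp_apply]
        push_cast
        ring

-- ===== VERDICT (by name: the statement is the Claim_ definition above) =====
theorem ascendingFactorialTwos_spec : Claim_equal_ascendingFactorialTwos := by
  intro bound _
  unfold Spec_ascendingFactorialTwos ascendingFactorialTwos
  have hB : ascendingFactorialTwos_alt bound =
      (PySem.List.pyRange 0
        (ascFTSearch (if bound > 0 then bound else 0).toNat bound 0 (if bound > 0 then bound else 0)) 1).map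
        (fun i => i * (i + 1)) := rfl
  have hhi0 : (0:Int) ≤ (if bound > 0 then bound else 0) := by split <;> omega
  have hhib : (if bound > 0 then bound else 0) ≤ bound.toNat := by split <;> omega
  have hhifail : ¬ ((if bound > 0 then bound else 0) * ((if bound > 0 then bound else 0) + 1) < bound) := by
    split
    · rename_i h; nlinarith
    · rename_i h; nlinarith
  obtain ⟨hn0, hnhi, hlow, hfail⟩ := ascFTSearch_spec bound
    (if bound > 0 then bound else 0).toNat 0 (if bound > 0 then bound else 0)
    (by omega) le_rfl hhi0 (fun j _ hjlt => by omega) hhifail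
  set n := ascFTSearch (if bound > 0 then bound else 0).toNat bound 0 (if bound > 0 then bound else 0) with hn
  have hA := ascFTLoopA_spec bound n.toNat (bound.toNat + 1) 0 [] (by omega) le_rfl
    (fun j hj hjlt => hlow j hj (by omega))
    (by
      have heq : (0 : Int) + (n.toNat : Int) = n := by omega
      rw [heq]; exact hfail)
  rw [hA, hB, PySem.List.pyRange_one, List.map_map]
  simp only [List.nil_append, sub_zero]
  apply List.map_congr_left
  intro t _
  simp only [Function.comp_apply]
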